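-- pv_equiv track=rewrite | github.com/current2020/cuhksz-csc4001-2025sp | generator_meta.py | get_opt_sequence
-- ===== SOURCE A (Python) =====
-- default_skip_code = "Quuuuuux\n"
--
-- def get_opt_sequence(black_pos, white_pos):
--     res = ""
--     num_black = len(black_pos)
--     num_white = len(white_pos)
--     nxt_black = 0
--     nxt_white = 0
--     nxt_line = 0
--
--     while nxt_black < num_black or nxt_white < num_white:
--         nxt_line += 1
--         if nxt_line % 2 == 1:
--             if nxt_black < num_black:
--                 x, y = black_pos[nxt_black]
--                 nxt_black += 1
--                 res += f"{x} {y}\n"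
--             else:
--                 res += default_skip_code
--         else:
--             if nxt_white < num_white:
--                 x, y = white_pos[nxt_white]
--                 nxt_white += 1
--                 res += f"{x} {y}\n"
--             else:
--                 res += default_skip_code
--
--     return res
-- ===== SOURCE B (Python) =====
-- default_skip_code = "Quuuuuux\n"
--
-- def get_opt_sequence(black_pos, white_pos):
--     num_black = len(black_pos)
--     num_white = len(white_pos)
--     n = max(2 * num_black - 1, 2 * num_white)
--
--     def piece(i):
--         if i % 2 == 1:
--             k = (i - 1) // 2
--             if k < num_black:
--                 x, y = black_pos[k]
--                 return f"{x} {y}\n"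
--         else:
--             k = i // 2 - 1
--             if k < num_white:
--                 x, y = white_pos[k]
--                 return f"{x} {y}\n"
--         return default_skip_code
--
--     return "".join(piece(i) for i in range(1, n + 1))
-- ===== Notes on version B (the rewrite author's own statement) =====
-- stated objective: alternative
-- what changed: Replaces the two-pointer while loop with mutable counters by computing the total line count N = max(2*len(black)-1, 2*len(white)) up front and joining a comprehension over range(1, N+1) that maps each line index directly to a position via parity and index arithmetic.
import Mathlib
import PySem

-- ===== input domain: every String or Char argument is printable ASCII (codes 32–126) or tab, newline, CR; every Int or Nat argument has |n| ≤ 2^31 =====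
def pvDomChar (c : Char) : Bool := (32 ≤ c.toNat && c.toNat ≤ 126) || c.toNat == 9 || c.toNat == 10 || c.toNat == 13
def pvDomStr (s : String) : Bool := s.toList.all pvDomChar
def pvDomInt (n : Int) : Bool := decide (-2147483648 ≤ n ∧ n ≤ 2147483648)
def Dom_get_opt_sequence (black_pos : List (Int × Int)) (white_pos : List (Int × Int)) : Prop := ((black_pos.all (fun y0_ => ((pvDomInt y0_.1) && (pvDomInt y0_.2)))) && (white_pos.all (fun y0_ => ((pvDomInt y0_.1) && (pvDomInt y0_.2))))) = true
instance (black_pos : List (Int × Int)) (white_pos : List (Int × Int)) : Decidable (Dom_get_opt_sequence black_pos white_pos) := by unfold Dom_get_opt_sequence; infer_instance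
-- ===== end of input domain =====

-- B replaces A's two-pointer while loop (mutable counters, string +=) by a precomputed total
-- line count and a joined comprehension indexing each line directly (objective: alternative).

def pvSkipCode : String := "Quuuuuux\n"

def pvFmt (p : Int × Int) : String := PySem.Int.toStr p.1 ++ " " ++ PySem.Int.toStr p.2 ++ "\n"

-- ===== PORT A =====
-- A's while loop, transliterated: counters nxt_black (i) / nxt_white (j) / nxt_line (line)
-- and the accumulator res; the fuel only makes the loop total (the guard is Python's loop
-- condition) and never runs out at the fuel get_opt_sequence supplies.
def pvLoopA (bp wp : List (Int × Int)) (fuel : Nat) (i j line : Nat) (res : String) : String :=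
  match fuel with
  | 0 => res
  | fuel + 1 =>
    if i < bp.length ∨ j < wp.length then
      let line' := line + 1
      if line' % 2 = 1 then
        if h : i < bp.length then
          pvLoopA bp wp fuel (i + 1) j line' (res ++ pvFmt bp[i])
        else
          pvLoopA bp wp fuel i j line' (res ++ pvSkipCode)
      else
        if h : j < wp.length then
          pvLoopA bp wp fuel i (j + 1) line' (res ++ pvFmt wp[j])
        else
          pvLoopA bp wp fuel i j line' (res ++ pvSkipCode)
    else res

def get_opt_sequence (black_pos : List (Int × Int)) (white_pos : List (Int × Int)) : String :=
  pvLoopA black_pos white_pos (2 * (black_pos.length + white_pos.length) + 1) 0 0 0 ""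

-- ===== PORT B =====
-- Source B's piece(i): the parity of the line index picks the list, index arithmetic picks the
-- element (the k < length guard keeps the indexing in range, as in Source B).
def pvPiece (bp wp : List (Int × Int)) (i : Int) : String :=
  if PySem.Int.mod i 2 = 1 then
    let k := PySem.Int.floordiv (i - 1) 2
    if k < (bp.length : Int) then pvFmt (PySem.List.pyGetD bp k (0, 0)) else pvSkipCode
  else
    let k := PySem.Int.floordiv i 2 - 1
    if k < (wp.length : Int) then pvFmt (PySem.List.pyGetD wp k (0, 0)) else pvSkipCode

def get_opt_sequence_alt (black_pos : List (Int × Int)) (white_pos : List (Int × Int)) : String :=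
  let n : Int := max (2 * (black_pos.length : Int) - 1) (2 * (white_pos.length : Int))
  String.join ((PySem.List.pyRange 1 (n + 1) 1).map (pvPiece black_pos white_pos))

-- ===== PRECONDITION & SPEC =====
def Spec_get_opt_sequence (black_pos : List (Int × Int)) (white_pos : List (Int × Int)) (out : String) : Prop := out = get_opt_sequence_alt black_pos white_pos
instance (black_pos : List (Int × Int)) (white_pos : List (Int × Int)) (out : String) : Decidable (Spec_get_opt_sequence black_pos white_pos out) := by unfold Spec_get_opt_sequence; infer_instance

-- ===== CLAIM (what is proved, stated in full; the proofs are below) =====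
def Claim_equal_get_opt_sequence : Prop := ∀ (black_pos : List (Int × Int)) (white_pos : List (Int × Int)), Dom_get_opt_sequence black_pos white_pos → Spec_get_opt_sequence black_pos white_pos (get_opt_sequence black_pos white_pos)

-- ===== LEMMAS AND PROOFS =====

-- total number of emitted lines, as a Nat
def pvN (bp wp : List (Int × Int)) : Nat := max (2 * bp.length - 1) (2 * wp.length)

theorem join_cons (a : String) (l : List String) : String.join (a :: l) = a ++ String.join l := by
  suffices h : ∀ (l : List String) (x : String), l.foldl (· ++ ·) x = x ++ l.foldl (· ++ ·) "" by
    simp [String.join]; rw [h l a]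
  intro l
  induction l with
  | nil => simp
  | cons y ys ih =>
    intro x; simp only [List.foldl_cons]; rw [ih ("" ++ y), ih (x ++ y)]
    simp [String.append_assoc]

-- B's piece on the odd line c+1 (c even): black_pos[c/2], or the skip code past the end
lemma pvPiece_black (bp wp : List (Int × Int)) (c : Nat) (hc : c % 2 = 0) :
    pvPiece bp wp ((c : Int) + 1)
      = if h : c / 2 < bp.length then pvFmt bp[c / 2] else pvSkipCode := by
  unfold pvPiece
  rw [if_pos (by rw [PySem.Int.mod_eq_emod_of_pos (by norm_num)]; omega)]
  have hk : PySem.Int.floordiv (((c : Int) + 1) - 1) 2 = ((c / 2 : Nat) : Int) := by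
    rw [PySem.Int.floordiv_eq_ediv_of_pos (by norm_num)]; omega
  rw [hk]
  by_cases h : c / 2 < bp.length
  · rw [if_pos (by exact_mod_cast h), dif_pos h, PySem.List.pyGetD_natCast,
      List.getD_eq_getElem _ _ h]
  · rw [if_neg (by exact_mod_cast h), dif_neg h]

-- B's piece on the even line c+1 (c odd): white_pos[c/2], or the skip code past the end
lemma pvPiece_white (bp wp : List (Int × Int)) (c : Nat) (hc : c % 2 = 1) :
    pvPiece bp wp ((c : Int) + 1)
      = if h : c / 2 < wp.length then pvFmt wp[c / 2] else pvSkipCode := by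
  unfold pvPiece
  rw [if_neg (by rw [PySem.Int.mod_eq_emod_of_pos (by norm_num)]; omega)]
  have hk : PySem.Int.floordiv ((c : Int) + 1) 2 - 1 = ((c / 2 : Nat) : Int) := by
    rw [PySem.Int.floordiv_eq_ediv_of_pos (by norm_num)]; omega
  rw [hk]
  by_cases h : c / 2 < wp.length
  · rw [if_pos (by exact_mod_cast h), dif_pos h, PySem.List.pyGetD_natCast,
      List.getD_eq_getElem _ _ h]
  · rw [if_neg (by exact_mod_cast h), dif_neg h]

-- loop invariant: after c lines, A has consumed min(nb, (c+1)/2) black and min(nw, c/2) white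
-- positions, and from there the loop appends exactly B's pieces for lines c+1 .. pvN
lemma pv_loop_eq (bp wp : List (Int × Int)) :
    ∀ (fuel c : Nat) (res : String), pvN bp wp ≤ c + fuel →
      pvLoopA bp wp fuel (min bp.length ((c + 1) / 2)) (min wp.length (c / 2)) c res
        = res ++ String.join ((List.range' (c + 1) (pvN bp wp - c)).map
            (fun i : Nat => pvPiece bp wp (i : Int))) := by
  intro fuel
  induction fuel with
  | zero =>
    intro c res h
    have h0 : pvN bp wp - c = 0 := by omega
    simp [pvLoopA, h0, String.join]
  | succ f ih =>
    intro c res h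
    by_cases hc : c < pvN bp wp
    · have hcond : min bp.length ((c + 1) / 2) < bp.length ∨ min wp.length (c / 2) < wp.length := by
        simp only [pvN] at hc; omega
      have hr : pvN bp wp - c = (pvN bp wp - (c + 1)) + 1 := by omega
      simp only [pvLoopA]
      rw [if_pos hcond, hr, List.range'_succ, List.map_cons, join_cons,
        ← String.append_assoc]
      rcases Nat.even_or_odd c with he | ho
      · -- c even: line c+1 is odd, black's turn
        have hce : c % 2 = 0 := Nat.even_iff.mp he
        rw [if_pos (by omega)]
        rw [Nat.cast_add_one, pvPiece_black bp wp c hce]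
        by_cases hb : c / 2 < bp.length
        · rw [dif_pos (by omega), dif_pos hb]
          have e1 : min bp.length ((c + 1) / 2) + 1 = min bp.length ((c + 1 + 1) / 2) := by omega
          have e2 : min wp.length (c / 2) = min wp.length ((c + 1) / 2) := by omega
          have e3 : min bp.length ((c + 1) / 2) = c / 2 := by omega
          rw [getElem_congr rfl e3 (by omega), e1, e2, ih (c + 1) _ (by omega)]
        · rw [dif_neg (by omega), dif_neg hb]
          have e1 : min bp.length ((c + 1) / 2) = min bp.length ((c + 1 + 1) / 2) := by omega
          have e2 : min wp.length (c / 2) = min wp.length ((c + 1) / 2) := by omega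
          rw [e1, e2, ih (c + 1) _ (by omega)]
      · -- c odd: line c+1 is even, white's turn
        have hco : c % 2 = 1 := Nat.odd_iff.mp ho
        rw [if_neg (by omega)]
        rw [Nat.cast_add_one, pvPiece_white bp wp c hco]
        by_cases hw : c / 2 < wp.length
        · rw [dif_pos (by omega), dif_pos hw]
          have e1 : min wp.length (c / 2) + 1 = min wp.length ((c + 1) / 2) := by omega
          have e2 : min bp.length ((c + 1) / 2) = min bp.length ((c + 1 + 1) / 2) := by omega
          have e3 : min wp.length (c / 2) = c / 2 := by omega
          rw [getElem_congr rfl e3 (by omega), e2, e1, ih (c + 1) _ (by omega)]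
        · rw [dif_neg (by omega), dif_neg hw]
          have e1 : min bp.length ((c + 1) / 2) = min bp.length ((c + 1 + 1) / 2) := by omega
          have e2 : min wp.length (c / 2) = min wp.length ((c + 1) / 2) := by omega
          rw [e1, e2, ih (c + 1) _ (by omega)]
    · have h0 : pvN bp wp - c = 0 := by omega
      simp only [pvLoopA]
      rw [if_neg (by simp only [pvN] at hc; omega)]
      simp [h0, String.join]

-- B's range(1, n+1) is the Nat range 1 .. pvN, cast to Int (n = -1 on two empty lists: both nil)
lemma pv_range_eq (bp wp : List (Int × Int)) :
    PySem.List.pyRange 1 (max (2 * (bp.length : Int) - 1) (2 * (wp.length : Int)) + 1) 1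
      = (List.range' 1 (pvN bp wp)).map (fun i : Nat => (i : Int)) := by
  rw [PySem.List.pyRange_one, List.range'_eq_map_range, List.map_map]
  have hm : (max (2 * (bp.length : Int) - 1) (2 * (wp.length : Int)) + 1 - 1).toNat = pvN bp wp := by
    simp only [pvN]; omega
  rw [hm]
  refine List.map_congr_left fun k _ => ?_
  simp [Function.comp]

theorem pv_main (bp wp : List (Int × Int)) : get_opt_sequence bp wp = get_opt_sequence_alt bp wp := by
  simp only [get_opt_sequence, get_opt_sequence_alt]
  rw [pv_range_eq, List.map_map]
  have h := pv_loop_eq bp wp (2 * (bp.length + wp.length) + 1) 0 "" (by simp only [pvN]; omega)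
  norm_num at h
  rw [h]
  rfl

-- ===== VERDICT (by name: the statement is the Claim_ definition above) =====
theorem get_opt_sequence_spec : Claim_equal_get_opt_sequence := by
  intro bp wp _
  unfold Spec_get_opt_sequence
  exact pv_main bp wp
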